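-- pv_equiv track=rewrite | github.com/RyotoMurata/HARMurata2 | Train_RF_from_csv.py | label_at_window_median
-- ===== SOURCE A (Python) =====
-- from typing import List, Sequence
--
-- def label_at_window_median(labels: Sequence[object]):
--     """ウィンドウ内の中央時刻付近に最初に現れる非Noneラベルを返します。"""
--     n = len(labels)
--     if n == 0:
--         return None
--     mid = n // 2
--     if labels[mid] is not None:
--         return labels[mid]
--     for off in range(1, n):
--         for cand in (mid - off, mid + off):
--             if 0 <= cand < n and labels[cand] is not None:
--                 return labels[cand]
--     return None
-- ===== SOURCE B (Python) =====
-- def label_at_window_median(labels):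
--     """Single linear argmin pass: pick the non-None label whose index minimizes
--     (abs(i - mid), i) — same result as the outward ring scan."""
--     n = len(labels)
--     if n == 0:
--         return None
--     mid = n // 2
--     best = None  # (key, label)
--     for i, lab in enumerate(labels):
--         if lab is not None:
--             key = (abs(i - mid), i)
--             if best is None or key < best[0]:
--                 best = (key, lab)
--     return None if best is None else best[1]
-- ===== Notes on version B (the rewrite author's own statement) =====
-- stated objective: alternative
-- what changed: Replaced the outward ring scan (mid, mid-1, mid+1, ...) with early return by a single linear argmin pass over enumerate(labels) keeping the non-None label with the smallest key (abs(i-mid), i).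
import Mathlib
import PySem

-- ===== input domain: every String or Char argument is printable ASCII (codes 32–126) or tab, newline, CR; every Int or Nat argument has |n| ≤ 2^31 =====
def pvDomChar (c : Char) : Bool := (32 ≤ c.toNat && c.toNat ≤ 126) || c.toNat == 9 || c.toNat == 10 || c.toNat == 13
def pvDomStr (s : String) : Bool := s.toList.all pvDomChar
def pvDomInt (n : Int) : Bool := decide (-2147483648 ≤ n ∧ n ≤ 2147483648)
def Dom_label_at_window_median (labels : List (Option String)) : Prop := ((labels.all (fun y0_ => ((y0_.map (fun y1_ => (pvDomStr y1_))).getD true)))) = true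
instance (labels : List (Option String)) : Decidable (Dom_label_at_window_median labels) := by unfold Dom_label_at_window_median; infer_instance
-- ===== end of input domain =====

-- B replaces A's outward ring scan by one linear argmin pass with key (|i-mid|, i); alternative decomposition, same cost.

-- ===== PORT A =====
-- the inner 'if 0 <= cand < n and labels[cand] is not None: return labels[cand]'
def pvTryA (labels : List (Option String)) (n cand : Int) : Option String :=
  if 0 ≤ cand ∧ cand < n then PySem.List.pyGetD labels cand none else none

-- 'for off in range(1, n): for cand in (mid - off, mid + off): …'
def pvLoopA (labels : List (Option String)) (n mid : Int) : List Int → Option String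
  | [] => none
  | off :: rest =>
    match pvTryA labels n (mid - off) with
    | some s => some s
    | none =>
      match pvTryA labels n (mid + off) with
      | some s => some s
      | none => pvLoopA labels n mid rest

def label_at_window_median (labels : List (Option String)) : Option String :=
  let n : Int := labels.length
  if n = 0 then none
  else
    let mid := PySem.Int.floordiv n 2
    match PySem.List.pyGetD labels mid none with
    | some s => some s
    | none => pvLoopA labels n mid (PySem.List.pyRange 1 n 1)

-- ===== PORT B =====
-- Python tuple comparison 'key < best[0]' on (int, int)
def pvKeyLt (a b : Int × Int) : Bool := a.1 < b.1 || (a.1 == b.1 && a.2 < b.2)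

-- 'for i, lab in enumerate(labels): …' keeping best = (key, label)
def pvLoopB (mid : Int) : List (Int × Option String) → Option ((Int × Int) × String) → Option ((Int × Int) × String)
  | [], best => best
  | (i, lab) :: rest, best =>
    match lab with
    | none => pvLoopB mid rest best
    | some s =>
      let key : Int × Int := (((i - mid).natAbs : Int), i)
      match best with
      | none => pvLoopB mid rest (some (key, s))
      | some (bk, bs) =>
        if pvKeyLt key bk then pvLoopB mid rest (some (key, s))
        else pvLoopB mid rest (some (bk, bs))

def label_at_window_median_alt (labels : List (Option String)) : Option String :=
  let n : Int := labels.length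
  if n = 0 then none
  else
    let mid := PySem.Int.floordiv n 2
    (pvLoopB mid (PySem.List.enumerate labels 0) none).map (·.2)

-- ===== PRECONDITION & SPEC =====
def Spec_label_at_window_median (labels : List (Option String)) (out : Option String) : Prop := out = label_at_window_median_alt labels
instance (labels : List (Option String)) (out : Option String) : Decidable (Spec_label_at_window_median labels out) := by unfold Spec_label_at_window_median; infer_instance

-- ===== CLAIM (what is proved, stated in full; the proofs are below) =====
def Claim_equal_label_at_window_median : Prop := ∀ (labels : List (Option String)), Dom_label_at_window_median labels → Spec_label_at_window_median labels (label_at_window_median labels)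

-- ===== LEMMAS AND PROOFS =====

-- total strict rank of index i in A's visiting order: mid first, then mid-1, mid+1, mid-2, …
def pvRank (mid i : Int) : Int := if i ≤ mid then 2 * (mid - i) else 2 * (i - mid) + 1

-- "r is the label at the rank-minimal non-None index below m (or none if there is none)"
def pvGoodS (labels : List (Option String)) (mid m : Int) (r : Option String) : Prop :=
  (r = none ∧ ∀ i : Int, 0 ≤ i → i < m → PySem.List.pyGetD labels i none = none)
  ∨ (∃ i s, 0 ≤ i ∧ i < m ∧ PySem.List.pyGetD labels i none = some s ∧ r = some s ∧
      ∀ j : Int, 0 ≤ j → j < m → j ≠ i → PySem.List.pyGetD labels j none ≠ none → pvRank mid i < pvRank mid j)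

-- same, with B's (key, label) state
def pvGood (labels : List (Option String)) (mid m : Int) (r : Option ((Int × Int) × String)) : Prop :=
  (r = none ∧ ∀ i : Int, 0 ≤ i → i < m → PySem.List.pyGetD labels i none = none)
  ∨ (∃ i s, 0 ≤ i ∧ i < m ∧ PySem.List.pyGetD labels i none = some s ∧
      r = some ((((i - mid).natAbs : Int), i), s) ∧
      ∀ j : Int, 0 ≤ j → j < m → j ≠ i → PySem.List.pyGetD labels j none ≠ none → pvRank mid i < pvRank mid j)

theorem pvKeyLt_iff_rank (mid i j : Int) :
    pvKeyLt (((i - mid).natAbs : Int), i) (((j - mid).natAbs : Int), j) = true ↔ pvRank mid i < pvRank mid j := by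
  simp only [pvKeyLt, pvRank, Bool.or_eq_true, Bool.and_eq_true, decide_eq_true_eq, beq_iff_eq]
  split_ifs <;> omega

theorem pvRank_inj (mid i j : Int) (h : pvRank mid i = pvRank mid j) : i = j := by
  simp only [pvRank] at h; split_ifs at h <;> omega

theorem pvGoodS_unique (labels : List (Option String)) (mid m : Int)
    (r r' : Option String) (h : pvGoodS labels mid m r) (h' : pvGoodS labels mid m r') : r = r' := by
  rcases h with ⟨h0, hall⟩ | ⟨i, s, hi0, him, hget, hr, hmin⟩
  · rcases h' with ⟨h0', _⟩ | ⟨i', s', hi0', him', hget', hr', _⟩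
    · rw [h0, h0']
    · exact absurd hget' (by simp [hall i' hi0' him'])
  · rcases h' with ⟨h0', hall'⟩ | ⟨i', s', hi0', him', hget', hr', hmin'⟩
    · exact absurd hget (by simp [hall' i hi0 him])
    · by_cases hii : i = i'
      · subst hii; rw [hr, hr']; rw [hget] at hget'
        simp only [Option.some.injEq] at hget'; rw [hget']
      · have h1 := hmin i' hi0' him' (fun h => hii h.symm) (by simp [hget'])
        have h2 := hmin' i hi0 him hii (by simp [hget])
        omega

theorem pvGood_toS (labels : List (Option String)) (mid m : Int)
    (r : Option ((Int × Int) × String)) (h : pvGood labels mid m r) :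
    pvGoodS labels mid m (r.map (·.2)) := by
  rcases h with ⟨h0, hall⟩ | ⟨i, s, hi0, him, hget, hr, hmin⟩
  · exact Or.inl ⟨by simp [h0], hall⟩
  · exact Or.inr ⟨i, s, hi0, him, hget, by rw [hr]; rfl, hmin⟩

theorem pvGetD_eq_get (labels : List (Option String)) (i : Int)
    (h0 : 0 ≤ i) (hn : i < (labels.length : Int)) :
    PySem.List.pyGetD labels i none = labels[i.toNat]'(by omega) := by
  exact PySem.List.pyGetD_eq_getElem labels none h0 hn

theorem pvTryA_some (labels : List (Option String)) (n c : Int) (s : String)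
    (h : pvTryA labels n c = some s) :
    (0 ≤ c ∧ c < n) ∧ PySem.List.pyGetD labels c none = some s := by
  simp only [pvTryA] at h
  split_ifs at h with hg
  exact ⟨hg, h⟩

theorem pvTryA_none_get (labels : List (Option String)) (n c : Int)
    (h : pvTryA labels n c = none) (h0 : 0 ≤ c) (h1 : c < n) :
    PySem.List.pyGetD labels c none = none := by
  simp only [pvTryA, if_pos (And.intro h0 h1)] at h
  exact h

-- extending pvGood past an index whose label is None
theorem pvGood_extend_none (labels : List (Option String)) (mid m : Int)
    (r : Option ((Int × Int) × String)) (hm : PySem.List.pyGetD labels m none = none)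
    (h : pvGood labels mid m r) : pvGood labels mid (m + 1) r := by
  rcases h with ⟨h0, hall⟩ | ⟨i, s, hi0, him, hget, hr, hmin⟩
  · refine Or.inl ⟨h0, fun i hi0 hi1 => ?_⟩
    by_cases hi : i = m
    · rw [hi]; exact hm
    · exact hall i hi0 (by omega)
  · refine Or.inr ⟨i, s, hi0, by omega, hget, hr, fun j hj0 hj1 hji hjn => ?_⟩
    by_cases hj : j = m
    · exact absurd (hj ▸ hm) hjn
    · exact hmin j hj0 (by omega) hji hjn

-- B's loop invariant
theorem pvLoopB_inv (labels : List (Option String)) (mid : Int) :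
    ∀ (tail : List (Option String)) (st : Int) (best : Option ((Int × Int) × String)),
    0 ≤ st → labels.drop st.toNat = tail → pvGood labels mid st best →
    pvGood labels mid (st + (tail.length : Int)) (pvLoopB mid (PySem.List.enumerate tail st) best) := by
  intro tail
  induction tail with
  | nil =>
    intro st best hst hdrop h
    simpa [PySem.List.enumerate_nil, pvLoopB] using h
  | cons x tl ih =>
    intro st best hst hdrop h
    have hstN : st.toNat < labels.length := by
      have := congrArg List.length hdrop
      simp [List.length_drop] at this
      omega
    have hstlt : st < (labels.length : Int) := by omega
    have hgetst : PySem.List.pyGetD labels st none = x := by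
      rw [pvGetD_eq_get labels st hst hstlt]
      have h3 : labels[st.toNat]? = some x := by
        have h4 := congrArg (fun l : List (Option String) => l[0]?) hdrop
        simpa [List.getElem?_drop] using h4
      obtain ⟨_, h5⟩ := List.getElem?_eq_some_iff.mp h3
      exact h5
    have hdrop' : labels.drop (st + 1).toNat = tl := by
      have h1 : (st + 1).toNat = st.toNat + 1 := by omega
      rw [h1, ← List.drop_drop, hdrop]
      rfl
    have hm : st + ((x :: tl).length : Int) = (st + 1) + (tl.length : Int) := by
      simp only [List.length_cons]; push_cast; omega
    rw [hm, PySem.List.enumerate_cons]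
    cases x with
    | none =>
      simp only [pvLoopB]
      exact ih (st + 1) best (by omega) hdrop' (pvGood_extend_none labels mid st best hgetst h)
    | some s =>
      rcases h with ⟨h0, hall⟩ | ⟨i, si, hi0, him, hget, hr, hmin⟩
      · rw [h0]
        simp only [pvLoopB]
        exact ih (st + 1) _ (by omega) hdrop' (Or.inr ⟨st, s, hst, by omega, hgetst, rfl,
          fun j hj0 hj1 hji hjn => absurd (hall j hj0 (by omega)) hjn⟩)
      · rw [hr]
        simp only [pvLoopB]
        by_cases hk : pvKeyLt (((st - mid).natAbs : Int), st) (((i - mid).natAbs : Int), i) = true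
        · rw [if_pos hk]
          have hrank : pvRank mid st < pvRank mid i := (pvKeyLt_iff_rank mid st i).mp hk
          refine ih (st + 1) _ (by omega) hdrop' (Or.inr ⟨st, s, hst, by omega, hgetst, rfl,
            fun j hj0 hj1 hji hjn => ?_⟩)
          by_cases hj : j = i
          · rw [hj]; exact hrank
          · exact lt_trans hrank (hmin j hj0 (by omega) hj hjn)
        · rw [if_neg hk]
          have hrank : pvRank mid i < pvRank mid st := by
            have h1 : ¬ pvRank mid st < pvRank mid i := fun hc =>
              hk ((pvKeyLt_iff_rank mid st i).mpr hc)
            have h2 : pvRank mid i ≠ pvRank mid st := fun hc => by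
              have := pvRank_inj mid i st hc; omega
            omega
          refine ih (st + 1) _ (by omega) hdrop' (Or.inr ⟨i, si, hi0, by omega, hget, rfl,
            fun j hj0 hj1 hji hjn => ?_⟩)
          by_cases hj : j = st
          · rw [hj]; exact hrank
          · exact hmin j hj0 (by omega) hji hjn

-- A's loop, from offset o on, is pvGoodS provided everything strictly closer than o is None
theorem pvLoopA_good (labels : List (Option String)) (mid : Int)
    (hm0 : 0 ≤ mid) (hmn : mid < (labels.length : Int)) :
    ∀ (fuel : Nat) (o : Int), o = (labels.length : Int) - fuel → 1 ≤ o →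
    (∀ i : Int, 0 ≤ i → i < (labels.length : Int) → mid - o < i → i < mid + o →
      PySem.List.pyGetD labels i none = none) →
    pvGoodS labels mid (labels.length : Int)
      (pvLoopA labels (labels.length : Int) mid (PySem.List.pyRange o (labels.length : Int) 1)) := by
  intro fuel
  induction fuel with
  | zero =>
    intro o ho h1 hnone
    rw [ho]
    simp only [Nat.cast_zero, sub_zero] at *
    rw [PySem.List.pyRange_one_eq_nil (le_refl _)]
    exact Or.inl ⟨rfl, fun i hi0 hi1 => hnone i hi0 hi1 (by omega) (by omega)⟩
  | succ fuel ih =>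
    intro o ho h1 hnone
    have hoN : o < (labels.length : Int) := by push_cast at ho; omega
    rw [PySem.List.pyRange_one_cons hoN]
    simp only [pvLoopA]
    cases hv1 : pvTryA labels (labels.length : Int) (mid - o) with
    | some s =>
      obtain ⟨⟨hc0, hc1⟩, hget1⟩ := pvTryA_some _ _ _ _ hv1
      refine Or.inr ⟨mid - o, s, hc0, hc1, hget1, rfl, fun j hj0 hj1 hji hjn => ?_⟩
      have hband : ¬ (mid - o < j ∧ j < mid + o) := fun hc =>
        hjn (hnone j hj0 hj1 hc.1 hc.2)
      simp only [pvRank]; split_ifs <;> omega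
    | none =>
      cases hv2 : pvTryA labels (labels.length : Int) (mid + o) with
      | some s =>
        obtain ⟨⟨hc0, hc1⟩, hget2⟩ := pvTryA_some _ _ _ _ hv2
        refine Or.inr ⟨mid + o, s, hc0, hc1, hget2, rfl, fun j hj0 hj1 hji hjn => ?_⟩
        have hband : ¬ (mid - o < j ∧ j < mid + o) := fun hc =>
          hjn (hnone j hj0 hj1 hc.1 hc.2)
        have hjml : j ≠ mid - o := fun hc =>
          hjn (hc ▸ pvTryA_none_get labels _ _ hv1 (by omega) (by omega))
        simp only [pvRank]; split_ifs <;> omega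
      | none =>
        refine ih (o + 1) (by push_cast at ho ⊢; omega) (by omega)
          (fun i hi0 hi1 hlo hhi => ?_)
        by_cases hc1 : i = mid - o
        · exact hc1 ▸ pvTryA_none_get labels _ _ hv1 (by omega) (by omega)
        · by_cases hc2 : i = mid + o
          · exact hc2 ▸ pvTryA_none_get labels _ _ hv2 (by omega) (by omega)
          · exact hnone i hi0 hi1 (by omega) (by omega)

theorem pvMid_bounds (labels : List (Option String)) (h : labels ≠ []) :
    0 ≤ PySem.Int.floordiv (labels.length : Int) 2 ∧
    PySem.Int.floordiv (labels.length : Int) 2 < (labels.length : Int) := by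
  have hlen : labels.length ≠ 0 := by simpa [List.length_eq_zero_iff] using h
  rw [PySem.Int.floordiv_eq_ediv_of_pos (by omega)]
  omega

theorem pvA_goodS (labels : List (Option String)) (h : labels ≠ []) :
    pvGoodS labels (PySem.Int.floordiv (labels.length : Int) 2) (labels.length : Int)
      (label_at_window_median labels) := by
  have hlen : labels.length ≠ 0 := by simpa [List.length_eq_zero_iff] using h
  obtain ⟨hm0, hmn⟩ := pvMid_bounds labels h
  simp only [label_at_window_median]
  rw [if_neg (by omega)]
  cases hmid : PySem.List.pyGetD labels (PySem.Int.floordiv (labels.length : Int) 2) none with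
  | some s =>
    refine Or.inr ⟨_, s, hm0, hmn, hmid, rfl, fun j hj0 hj1 hji hjn => ?_⟩
    simp only [pvRank]; split_ifs <;> omega
  | none =>
    refine pvLoopA_good labels _ hm0 hmn (labels.length - 1) 1 (by omega) (le_refl _)
      (fun i hi0 hi1 hlo hhi => ?_)
    have : i = PySem.Int.floordiv (labels.length : Int) 2 := by omega
    exact this ▸ hmid

theorem pvB_goodS (labels : List (Option String)) (h : labels ≠ []) :
    pvGoodS labels (PySem.Int.floordiv (labels.length : Int) 2) (labels.length : Int)
      (label_at_window_median_alt labels) := by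
  have hlen : labels.length ≠ 0 := by simpa [List.length_eq_zero_iff] using h
  simp only [label_at_window_median_alt]
  rw [if_neg (by omega)]
  have hinv := pvLoopB_inv labels (PySem.Int.floordiv (labels.length : Int) 2) labels 0 none
    (le_refl _) (by simp) (Or.inl ⟨rfl, fun i hi0 hi1 => by omega⟩)
  rw [zero_add] at hinv
  exact pvGood_toS labels _ _ _ hinv

-- ===== VERDICT (by name: the statement is the Claim_ definition above) =====
theorem label_at_window_median_spec : Claim_equal_label_at_window_median := by
  intro labels _hdom
  unfold Spec_label_at_window_median
  by_cases h : labels = []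
  · subst h; rfl
  · exact pvGoodS_unique labels _ _ _ _ (pvA_goodS labels h) (pvB_goodS labels h)
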